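-- pv_equiv track=rewrite | github.com/pkumars397/Python-Programming-Mooc-2024 | part04-38_grade_statistics/src/grade_statistics.py | grade_wise_pass
-- ===== SOURCE A (Python) =====
-- def grade_wise_pass(arr:list)->list:
--     passed_grade_wise=[];
--     passed_grade_wise=[0]*6
--     for i in range(len(arr)):
--         if arr[i][0]>=10:
--             totalGrade=arr[i][0]+arr[i][1]//10
--             if totalGrade<15:
--                   passed_grade_wise[0]+=1
--             elif totalGrade>=15 and totalGrade<=17:
--                   passed_grade_wise[1]+=1
--             elif totalGrade>=18 and totalGrade<=20:
--                   passed_grade_wise[2]+=1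
--             elif totalGrade>=21 and totalGrade<=23:
--                   passed_grade_wise[3]+=1
--             elif totalGrade>=24 and totalGrade<=27:
--                   passed_grade_wise[4]+=1
--             else:
--                   passed_grade_wise[5]+=1
--         else:
--             passed_grade_wise[0]+=1;
--     return passed_grade_wise;
-- ===== SOURCE B (Python) =====
-- def _below(totals, th):
--     return len([t for t in totals if t < th])
--
--
-- def grade_wise_pass(arr: list) -> list:
--     totals = [s[0] + s[1] // 10 for s in arr if s[0] >= 10]
--     failed = len(arr) - len(totals)
--     c15 = _below(totals, 15)
--     c18 = _below(totals, 18)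
--     c21 = _below(totals, 21)
--     c24 = _below(totals, 24)
--     c28 = _below(totals, 28)
--     return [failed + c15, c18 - c15, c21 - c18, c24 - c21,
--             c28 - c24, len(totals) - c28]
-- ===== Notes on version B (the rewrite author's own statement) =====
-- stated objective: alternative
-- what changed: B never classifies a student into a bucket: it collects the passing totals once, takes five cumulative below-threshold counts (15/18/21/24/28) over that list, and produces the six bucket counts as differences of those cumulative counts, replacing A's per-student six-way if/elif cascade with in-place counter increments; Pre_ only excludes inputs on which A raises IndexError (an empty row, or a passing row with no second element).
import Mathlib
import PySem

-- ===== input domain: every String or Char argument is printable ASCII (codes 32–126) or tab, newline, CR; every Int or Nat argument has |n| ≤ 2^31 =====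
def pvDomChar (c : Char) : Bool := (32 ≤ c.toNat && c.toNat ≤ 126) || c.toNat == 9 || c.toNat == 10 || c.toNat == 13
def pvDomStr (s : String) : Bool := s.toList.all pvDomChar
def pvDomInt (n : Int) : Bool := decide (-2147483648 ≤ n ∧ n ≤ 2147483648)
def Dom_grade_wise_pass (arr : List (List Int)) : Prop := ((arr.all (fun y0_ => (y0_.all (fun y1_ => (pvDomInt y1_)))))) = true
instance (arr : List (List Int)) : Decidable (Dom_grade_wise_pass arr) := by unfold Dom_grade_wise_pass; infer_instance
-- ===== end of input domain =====

-- B replaces A's per-student six-way if/elif classification with cumulative below-threshold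
-- counts over the passing totals, reading the bucket counts off as differences (alternative).

-- ===== PORT A =====
-- one iteration of A's for-loop body (the row is arr[i])
def pvRowStep (pg : List Int) (row : List Int) : List Int :=
  if PySem.List.pyGetD row 0 0 ≥ 10 then
    let totalGrade := PySem.List.pyGetD row 0 0 + PySem.Int.floordiv (PySem.List.pyGetD row 1 0) 10
    if totalGrade < 15 then
      PySem.List.pySetD pg 0 (PySem.List.pyGetD pg 0 0 + 1)
    else if 15 ≤ totalGrade ∧ totalGrade ≤ 17 then
      PySem.List.pySetD pg 1 (PySem.List.pyGetD pg 1 0 + 1)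
    else if 18 ≤ totalGrade ∧ totalGrade ≤ 20 then
      PySem.List.pySetD pg 2 (PySem.List.pyGetD pg 2 0 + 1)
    else if 21 ≤ totalGrade ∧ totalGrade ≤ 23 then
      PySem.List.pySetD pg 3 (PySem.List.pyGetD pg 3 0 + 1)
    else if 24 ≤ totalGrade ∧ totalGrade ≤ 27 then
      PySem.List.pySetD pg 4 (PySem.List.pyGetD pg 4 0 + 1)
    else
      PySem.List.pySetD pg 5 (PySem.List.pyGetD pg 5 0 + 1)
  else
    PySem.List.pySetD pg 0 (PySem.List.pyGetD pg 0 0 + 1)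

def grade_wise_pass (arr : List (List Int)) : List Int :=
  (PySem.List.pyRange 0 (PySem.List.len arr) 1).foldl
    (fun pg i => pvRowStep pg (PySem.List.pyGetD arr i [])) [0, 0, 0, 0, 0, 0]

-- ===== PORT B =====
-- len([t for t in totals if t < th])
def pvBelow (totals : List Int) (th : Int) : Int :=
  ((totals.filter (fun t => decide (t < th))).length : Int)

def grade_wise_pass_alt (arr : List (List Int)) : List Int :=
  let totals := (arr.filter (fun s => decide (10 ≤ PySem.List.pyGetD s 0 0))).map
      (fun s => PySem.List.pyGetD s 0 0 + PySem.Int.floordiv (PySem.List.pyGetD s 1 0) 10)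
  let failed : Int := (arr.length : Int) - (totals.length : Int)
  let c15 := pvBelow totals 15
  let c18 := pvBelow totals 18
  let c21 := pvBelow totals 21
  let c24 := pvBelow totals 24
  let c28 := pvBelow totals 28
  [failed + c15, c18 - c15, c21 - c18, c24 - c21, c28 - c24, (totals.length : Int) - c28]

-- ===== PRECONDITION & SPEC =====
-- Pre_ excludes exactly the inputs on which Python A raises IndexError: a row with no
-- elements, or a row whose first element is ≥ 10 (a passed student) with no second element.
def Pre_grade_wise_pass (arr : List (List Int)) : Prop :=
  ∀ r ∈ arr, r ≠ [] ∧ (10 ≤ r.headD 0 → 2 ≤ r.length)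
instance (arr : List (List Int)) : Decidable (Pre_grade_wise_pass arr) := by
  unfold Pre_grade_wise_pass; infer_instance

def pvWitness_grade_wise_pass : List (List Int) := [[12, 77], [5, 0], [25, 30]]

def Spec_grade_wise_pass (arr : List (List Int)) (out : List Int) : Prop := out = grade_wise_pass_alt arr
instance (arr : List (List Int)) (out : List Int) : Decidable (Spec_grade_wise_pass arr out) := by unfold Spec_grade_wise_pass; infer_instance

-- ===== CLAIM (what is proved, stated in full; the proofs are below) =====
def Claim_equal_grade_wise_pass : Prop := ∀ (arr : List (List Int)), Dom_grade_wise_pass arr → Pre_grade_wise_pass arr → Spec_grade_wise_pass arr (grade_wise_pass arr)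

-- ===== LEMMAS AND PROOFS =====

-- proof-side helpers: the total of a row and the bucket A's cascade selects for it
def pvTotal (r : List Int) : Int :=
  PySem.List.pyGetD r 0 0 + PySem.Int.floordiv (PySem.List.pyGetD r 1 0) 10

def pvBucket (r : List Int) : Int :=
  if PySem.List.pyGetD r 0 0 < 10 then 0
  else if pvTotal r < 15 then 0
  else if pvTotal r ≤ 17 then 1
  else if pvTotal r ≤ 20 then 2
  else if pvTotal r ≤ 23 then 3
  else if pvTotal r ≤ 27 then 4
  else 5

-- A's loop body always increments the counter at pvBucket's index
theorem pvRowStep_eq (pg r : List Int) :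
    pvRowStep pg r =
      PySem.List.pySetD pg (pvBucket r) (PySem.List.pyGetD pg (pvBucket r) 0 + 1) := by
  simp only [pvRowStep, pvBucket, pvTotal]
  split_ifs <;> first | rfl | omega

-- the fold of A's loop body, with the six counters explicit
theorem pvFold_rows (rows : List (List Int)) (p0 p1 p2 p3 p4 p5 : Int) :
    rows.foldl pvRowStep [p0, p1, p2, p3, p4, p5] =
      [p0 + ((rows.map pvBucket).count 0 : Int),
       p1 + ((rows.map pvBucket).count 1 : Int),
       p2 + ((rows.map pvBucket).count 2 : Int),
       p3 + ((rows.map pvBucket).count 3 : Int),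
       p4 + ((rows.map pvBucket).count 4 : Int),
       p5 + ((rows.map pvBucket).count 5 : Int)] := by
  induction rows generalizing p0 p1 p2 p3 p4 p5 with
  | nil => simp
  | cons r rest ih =>
    have h6 : pvBucket r = 0 ∨ pvBucket r = 1 ∨ pvBucket r = 2 ∨
        pvBucket r = 3 ∨ pvBucket r = 4 ∨ pvBucket r = 5 := by
      unfold pvBucket; split_ifs <;> omega
    simp only [List.foldl_cons, List.map_cons]
    rw [pvRowStep_eq]
    rcases h6 with hb | hb | hb | hb | hb | hb <;>
      rw [hb] <;>
      simp [PySem.List.pySetD, PySem.List.pySet?, PySem.List.pyIdx?, PySem.List.pyGetD, PySem.List.pyGet?, ih] <;>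
      omega

-- abbreviation for B's totals list
def pvTotals (rows : List (List Int)) : List Int :=
  (rows.filter (fun s => decide (10 ≤ PySem.List.pyGetD s 0 0))).map
    (fun s => PySem.List.pyGetD s 0 0 + PySem.Int.floordiv (PySem.List.pyGetD s 1 0) 10)

-- cons-step forms of count and of pvBelow, with the Int casts in place
theorem pvCount_cons (b k : Int) (bs : List Int) :
    (((b :: bs).count k : Nat) : Int) = ((bs.count k : Nat) : Int) + (if b = k then 1 else 0) := by
  by_cases h : b = k <;> simp [h]

theorem pvBelow_cons (t th : Int) (ts : List Int) :
    pvBelow (t :: ts) th = pvBelow ts th + (if t < th then 1 else 0) := by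
  unfold pvBelow
  rw [List.filter_cons]
  by_cases h : t < th
  · rw [if_pos (decide_eq_true h), if_pos h, List.length_cons]
    push_cast
    ring
  · rw [if_neg (by simpa using h), if_neg h]
    ring

-- the six bucket counts expressed through cumulative threshold counts
theorem pvCounts (rows : List (List Int)) :
    (((rows.map pvBucket).count 0 : Int) =
        ((rows.length : Int) - ((pvTotals rows).length : Int)) + pvBelow (pvTotals rows) 15)
  ∧ (((rows.map pvBucket).count 1 : Int) = pvBelow (pvTotals rows) 18 - pvBelow (pvTotals rows) 15)
  ∧ (((rows.map pvBucket).count 2 : Int) = pvBelow (pvTotals rows) 21 - pvBelow (pvTotals rows) 18)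
  ∧ (((rows.map pvBucket).count 3 : Int) = pvBelow (pvTotals rows) 24 - pvBelow (pvTotals rows) 21)
  ∧ (((rows.map pvBucket).count 4 : Int) = pvBelow (pvTotals rows) 28 - pvBelow (pvTotals rows) 24)
  ∧ (((rows.map pvBucket).count 5 : Int) = ((pvTotals rows).length : Int) - pvBelow (pvTotals rows) 28) := by
  induction rows with
  | nil => simp [pvTotals, pvBelow]
  | cons r rest ih =>
    obtain ⟨i0, i1, i2, i3, i4, i5⟩ := ih
    by_cases hp : 10 ≤ PySem.List.pyGetD r 0 0
    · have ht : pvTotals (r :: rest) = pvTotal r :: pvTotals rest := by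
        simp [pvTotals, pvTotal, hp]
      have hb : pvBucket r =
          (if pvTotal r < 15 then 0 else if pvTotal r ≤ 17 then 1 else if pvTotal r ≤ 20 then 2
           else if pvTotal r ≤ 23 then 3 else if pvTotal r ≤ 27 then 4 else 5) := by
        unfold pvBucket; rw [if_neg (by omega)]
      refine ⟨?_, ?_, ?_, ?_, ?_, ?_⟩ <;>
        · rw [List.map_cons, ht]
          simp only [pvCount_cons, pvBelow_cons, List.length_cons, hb]
          push_cast
          split_ifs <;> omega
    · have ht : pvTotals (r :: rest) = pvTotals rest := by
        simp [pvTotals, hp]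
      have hb : pvBucket r = 0 := by
        unfold pvBucket; rw [if_pos (by omega)]
      refine ⟨?_, ?_, ?_, ?_, ?_, ?_⟩ <;>
        · rw [List.map_cons, ht]
          simp only [pvCount_cons, List.length_cons, hb]
          push_cast
          omega

-- ===== VERDICT (by name: the statement is the Claim_ definition above) =====
theorem grade_wise_pass_spec : Claim_equal_grade_wise_pass := by
  intro arr _ _
  unfold Spec_grade_wise_pass grade_wise_pass grade_wise_pass_alt
  rw [show PySem.List.len arr = ((arr.length : Int)) from by simp [PySem.List.len]]
  rw [PySem.List.foldl_pyRange_zero_pyGetD' arr [] pvRowStep [0, 0, 0, 0, 0, 0]]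
  rw [pvFold_rows]
  obtain ⟨e0, e1, e2, e3, e4, e5⟩ := pvCounts arr
  simp only [pvTotals] at e0 e1 e2 e3 e4 e5
  simp [e0, e1, e2, e3, e4, e5]
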